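-- pv_equiv track=rewrite | github.com/MatthieuMichon/aoc-rtl | 15/5-2/explore.py | has_repeated_pairs_dcc
-- ===== SOURCE A (Python) =====
-- MIN_PAIR_DISTANCE = 2  # non-overlapping pair
--
-- def has_repeated_pairs_dcc(string: str) -> bool:
--     # Dual cross correlation approach
--     start_offset = MIN_PAIR_DISTANCE
--     stop_offset = len(string) - MIN_PAIR_DISTANCE
--     identical_pairs = False
--     for char_offset in range(start_offset, stop_offset):
--         char_map = zip(string, string[char_offset:])
--         identical_chars = [top == bot for top, bot in char_map]
--         identical_pairs = identical_pairs or any(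
--             identical_chars[i] and identical_chars[i + 1]
--             for i in range(len(identical_chars) - 1)
--         )
--     return identical_pairs
-- ===== SOURCE B (Python) =====
-- def has_repeated_pairs_dcc(string: str) -> bool:
--     # One pass: remember the first index of each adjacent character pair;
--     # a pair seen again at distance >= 2 is a non-overlapping repeat.
--     first = {}
--     for i in range(len(string) - 1):
--         pair = (string[i], string[i + 1])
--         if pair in first:
--             if i - first[pair] >= 2:
--                 return True
--         else:
--             first[pair] = i
--     return False
-- ===== Notes on version B (the rewrite author's own statement) =====
-- stated objective: faster
-- what changed: Replaces the O(n^2) offset-by-offset cross-correlation scan with a single pass that stores the first index of each adjacent character pair in a dict and reports a repeat as soon as the same pair recurs at distance >= 2.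
-- intended difference: On strings of length n >= 4 whose only repeated non-overlapping adjacent pair is the first pair recurring at the very end (distance exactly n-2, e.g. the witness string), A returns False because its offset loop stops at n-3, while B returns True, which is the intended answer for detecting a repeated non-overlapping pair. — e.g. on has_repeated_pairs_dcc("abab"): A returns false, B returns true
import Mathlib
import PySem

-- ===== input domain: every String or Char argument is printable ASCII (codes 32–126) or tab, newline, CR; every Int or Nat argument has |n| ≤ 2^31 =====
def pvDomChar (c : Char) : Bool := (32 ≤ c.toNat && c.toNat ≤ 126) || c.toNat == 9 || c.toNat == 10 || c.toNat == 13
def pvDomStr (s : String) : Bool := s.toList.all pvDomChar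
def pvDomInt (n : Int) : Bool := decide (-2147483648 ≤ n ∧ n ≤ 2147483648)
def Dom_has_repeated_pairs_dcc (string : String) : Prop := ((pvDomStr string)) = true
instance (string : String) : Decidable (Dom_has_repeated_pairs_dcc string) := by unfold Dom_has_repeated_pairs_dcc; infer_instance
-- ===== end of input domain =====

-- B replaces A's O(n^2) per-offset cross-correlation scan by a single pass storing the first
-- index of each adjacent pair in a dict (objective: faster, asymptotic); on the corner where
-- the only repeat is at distance len-2 (e.g. "abab") A returns False and B intentionally True.

-- ===== PORT A =====
def has_repeated_pairs_dcc (string : String) : Bool :=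
  let cs := string.toList
  let startOffset : Int := 2
  let stopOffset : Int := (cs.length : Int) - 2
  (PySem.List.pyRange startOffset stopOffset 1).foldl
    (fun identicalPairs charOffset =>
      let shifted := PySem.List.slice cs (some charOffset) none
      let identicalChars := (List.zip cs shifted).map (fun tb => tb.1 == tb.2)
      identicalPairs ||
        (List.range (identicalChars.length - 1)).any
          (fun i => identicalChars.getD i false && identicalChars.getD (i + 1) false))
    false

-- ===== PORT B =====
-- B's loop with early return, as structural recursion over the remaining indices;
-- `first` is the dict of first indices of pairs seen so far.
def hrpAltLoop (cs : List Char) : List Nat → PySem.Dict (Char × Char) Int → Bool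
  | [], _ => false
  | i :: rest, first =>
    let pair : Char × Char := (cs.getD i ' ', cs.getD (i + 1) ' ')
    match first.get? pair with
    | some f => if (i : Int) - f ≥ 2 then true else hrpAltLoop cs rest first
    | none => hrpAltLoop cs rest (first.insert pair (i : Int))

def has_repeated_pairs_dcc_alt (string : String) : Bool :=
  hrpAltLoop string.toList (List.range (string.toList.length - 1)) PySem.Dict.empty

-- ===== PRECONDITION & SPEC =====
-- On strings of length n ≥ 4 whose only repeated non-overlapping adjacent pair is the first
-- pair recurring at the very end (distance exactly n-2, e.g. "abab"), A returns false because
-- its offset loop stops at n-3, while B returns true — the intended answer for detecting a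
-- repeated non-overlapping pair.
def D_has_repeated_pairs_dcc (string : String) : Prop :=
  4 ≤ string.toList.length ∧
  string.toList.take 2 = string.toList.drop (string.toList.length - 2) ∧
  ∀ j < string.toList.length - 1, ∀ f < j - 1,
    (string.toList.drop f).take 2 = (string.toList.drop j).take 2 →
      j = f + string.toList.length - 2
instance (string : String) : Decidable (D_has_repeated_pairs_dcc string) := by
  unfold D_has_repeated_pairs_dcc; infer_instance

def Spec_has_repeated_pairs_dcc (string : String) (out : Bool) : Prop :=
  ¬ D_has_repeated_pairs_dcc string → out = has_repeated_pairs_dcc_alt string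
instance (string : String) (out : Bool) : Decidable (Spec_has_repeated_pairs_dcc string out) := by
  unfold Spec_has_repeated_pairs_dcc; infer_instance

def pvDiffWitness_has_repeated_pairs_dcc : String := "abab"
def pvDiffWitnessOut_has_repeated_pairs_dcc : Bool × Bool := (false, true)

-- ===== CLAIM (what is proved, stated in full; the proofs are below) =====
def Claim_unchanged_has_repeated_pairs_dcc : Prop := ∀ (string : String), Dom_has_repeated_pairs_dcc string → Spec_has_repeated_pairs_dcc string (has_repeated_pairs_dcc string)
def Claim_changed_has_repeated_pairs_dcc : Prop := Dom_has_repeated_pairs_dcc (pvDiffWitness_has_repeated_pairs_dcc) ∧ D_has_repeated_pairs_dcc (pvDiffWitness_has_repeated_pairs_dcc) ∧ has_repeated_pairs_dcc (pvDiffWitness_has_repeated_pairs_dcc) = pvDiffWitnessOut_has_repeated_pairs_dcc.1 ∧ has_repeated_pairs_dcc_alt (pvDiffWitness_has_repeated_pairs_dcc) = pvDiffWitnessOut_has_repeated_pairs_dcc.2 ∧ pvDiffWitnessOut_has_repeated_pairs_dcc.1 ≠ pvDiffWitnessOut_has_repeated_pairs_dcc.2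
def Claim_exact_has_repeated_pairs_dcc : Prop := ∀ (string : String), Dom_has_repeated_pairs_dcc string → D_has_repeated_pairs_dcc string → has_repeated_pairs_dcc string ≠ has_repeated_pairs_dcc_alt string

-- ===== LEMMAS AND PROOFS =====

-- the adjacent character pair at index k (total, default ' ')
def hrpPairAt (cs : List Char) (k : Nat) : Char × Char := (cs.getD k ' ', cs.getD (k + 1) ' ')

theorem hrpIcGetD (cs : List Char) (m i : Nat) (h : i + m < cs.length) :
    ((List.zip cs (cs.drop m)).map (fun tb => tb.1 == tb.2)).getD i false
      = (cs.getD i ' ' == cs.getD (i + m) ' ') := by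
  have hl : i < ((List.zip cs (cs.drop m)).map (fun tb => tb.1 == tb.2)).length := by
    simp; omega
  rw [List.getD_eq_getElem _ _ hl]
  have h1 : i < cs.length := by omega
  simp [List.getElem_zip, h1, Nat.add_comm m i, h]

theorem hrpFoldlOr (g : Int → Bool) (l : List Int) (b : Bool) :
    l.foldl (fun a x => a || g x) b = (b || l.any g) := by
  induction l generalizing b with
  | nil => simp
  | cons x xs ih => simp [List.foldl_cons, ih, Bool.or_assoc]

-- A returns true iff some adjacent pair repeats at a distance in [2, n-3]
theorem hrpA_iff (s : String) :
    has_repeated_pairs_dcc s = true ↔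
      ∃ f j : Nat, f + 2 ≤ j ∧ j + 3 ≤ f + s.toList.length ∧ j + 1 < s.toList.length ∧
        hrpPairAt s.toList f = hrpPairAt s.toList j := by
  show ((PySem.List.pyRange 2 ((s.toList.length : Int) - 2) 1).foldl _ false) = true ↔ _
  generalize s.toList = cs
  rw [hrpFoldlOr]
  simp only [Bool.false_or, List.any_eq_true]
  constructor
  · rintro ⟨o, ho, hg⟩
    rw [PySem.List.mem_pyRange_one] at ho
    obtain ⟨ho2, holt⟩ := ho
    set m := o.toNat with hm
    have hoeq : o = (m : Int) := by omega
    have hm2 : 2 ≤ m := by omega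
    have hmlt : m + 2 < cs.length := by omega
    rw [hoeq, PySem.List.slice_from_natCast] at hg
    simp only [List.mem_range, List.length_map, List.length_zip, List.length_drop] at hg
    obtain ⟨i, hi, hpair⟩ := hg
    rw [hrpIcGetD cs m i (by omega), hrpIcGetD cs m (i + 1) (by omega)] at hpair
    simp only [Bool.and_eq_true, beq_iff_eq] at hpair
    refine ⟨i, i + m, by omega, by omega, by omega, ?_⟩
    simp only [hrpPairAt, Prod.mk.injEq]
    exact ⟨hpair.1, by rw [show i + m + 1 = i + 1 + m by omega]; exact hpair.2⟩
  · rintro ⟨f, j, hfj, hgap, hjlt, hpq⟩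
    set m := j - f with hm
    refine ⟨(m : Int), ?_, ?_⟩
    · rw [PySem.List.mem_pyRange_one]; omega
    · rw [PySem.List.slice_from_natCast]
      simp only [List.mem_range, List.length_map, List.length_zip, List.length_drop]
      refine ⟨f, by omega, ?_⟩
      rw [hrpIcGetD cs m f (by omega), hrpIcGetD cs m (f + 1) (by omega)]
      simp only [hrpPairAt, Prod.mk.injEq] at hpq
      simp only [Bool.and_eq_true, beq_iff_eq]
      exact ⟨by rw [show f + m = j by omega]; exact hpq.1,
             by rw [show f + 1 + m = j + 1 by omega]; exact hpq.2⟩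

-- first-occurrence dict B's loop has built after processing indices < i
def hrpFO (cs : List Char) : Nat → PySem.Dict (Char × Char) Int
  | 0 => PySem.Dict.empty
  | i + 1 =>
    match (hrpFO cs i).get? (hrpPairAt cs i) with
    | some _ => hrpFO cs i
    | none => (hrpFO cs i).insert (hrpPairAt cs i) (i : Int)

theorem hrpFO_succ (cs : List Char) (i : Nat) :
    hrpFO cs (i + 1) = match (hrpFO cs i).get? (hrpPairAt cs i) with
      | some _ => hrpFO cs i
      | none => (hrpFO cs i).insert (hrpPairAt cs i) (i : Int) := rfl

theorem hrpFO_succ_some (cs : List Char) (i : Nat) (v : Int)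
    (h : (hrpFO cs i).get? (hrpPairAt cs i) = some v) : hrpFO cs (i + 1) = hrpFO cs i := by
  rw [hrpFO_succ, h]

theorem hrpFO_succ_none (cs : List Char) (i : Nat)
    (h : (hrpFO cs i).get? (hrpPairAt cs i) = none) :
    hrpFO cs (i + 1) = (hrpFO cs i).insert (hrpPairAt cs i) (i : Int) := by
  rw [hrpFO_succ, h]

theorem hrpFO_none (cs : List Char) (i : Nat) (p : Char × Char) :
    (hrpFO cs i).get? p = none ↔ ∀ k < i, hrpPairAt cs k ≠ p := by
  induction i with
  | zero => simp [hrpFO, PySem.Dict.get?_empty]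
  | succ i ih =>
    cases h : (hrpFO cs i).get? (hrpPairAt cs i) with
    | some v =>
      rw [hrpFO_succ_some cs i v h]
      by_cases hpe : hrpPairAt cs i = p
      · constructor
        · intro hc; rw [hpe] at h; rw [h] at hc; simp at hc
        · intro hall; exact absurd hpe (hall i (Nat.lt_succ_self i))
      · rw [ih]
        constructor
        · intro hall k hk
          rcases Nat.lt_succ_iff_lt_or_eq.mp hk with hk' | rfl
          · exact hall k hk'
          · exact hpe
        · intro hall k hk; exact hall k (Nat.lt_succ_of_lt hk)
    | none =>
      rw [hrpFO_succ_none cs i h, PySem.Dict.get?_insert]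
      constructor
      · intro hc
        split_ifs at hc with hpe
        · intro k hk
          rcases Nat.lt_succ_iff_lt_or_eq.mp hk with hk' | rfl
          · exact ih.mp hc k hk'
          · exact fun he => hpe he.symm
      · intro hall
        rw [if_neg (fun he => hall i (Nat.lt_succ_self i) he.symm)]
        exact ih.mpr (fun k hk => hall k (Nat.lt_succ_of_lt hk))

theorem hrpFO_some (cs : List Char) (i : Nat) (p : Char × Char) (v : Int)
    (h : (hrpFO cs i).get? p = some v) :
    ∃ k : Nat, v = (k : Int) ∧ k < i ∧ hrpPairAt cs k = p ∧ ∀ l < k, hrpPairAt cs l ≠ p := by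
  induction i with
  | zero => simp [hrpFO, PySem.Dict.get?_empty] at h
  | succ i ih =>
    cases h0 : (hrpFO cs i).get? (hrpPairAt cs i) with
    | some w =>
      rw [hrpFO_succ_some cs i w h0] at h
      obtain ⟨k, hk⟩ := ih h
      exact ⟨k, hk.1, Nat.lt_succ_of_lt hk.2.1, hk.2.2⟩
    | none =>
      rw [hrpFO_succ_none cs i h0, PySem.Dict.get?_insert] at h
      split_ifs at h with hpe
      · refine ⟨i, ?_, Nat.lt_succ_self i, hpe.symm, ?_⟩
        · exact (Option.some_inj.mp h).symm
        · intro l hl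
          rw [hpe]
          exact (hrpFO_none cs i (hrpPairAt cs i)).mp h0 l hl
      · obtain ⟨k, hk⟩ := ih h
        exact ⟨k, hk.1, Nat.lt_succ_of_lt hk.2.1, hk.2.2⟩

theorem hrpAltLoop_iff (cs : List Char) (m : Nat) : ∀ i : Nat,
    hrpAltLoop cs (List.range' i m) (hrpFO cs i) = true ↔
      ∃ j f : Nat, i ≤ j ∧ j < i + m ∧ f + 2 ≤ j ∧ hrpPairAt cs f = hrpPairAt cs j := by
  induction m with
  | zero => intro i; simp [hrpAltLoop]; omega
  | succ m ih =>
    intro i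
    rw [List.range'_succ]
    show (match (hrpFO cs i).get? (hrpPairAt cs i) with
      | some f => if (i : Int) - f ≥ 2 then true else hrpAltLoop cs (List.range' (i+1) m) (hrpFO cs i)
      | none => hrpAltLoop cs (List.range' (i+1) m) ((hrpFO cs i).insert (hrpPairAt cs i) (i : Int)))
      = true ↔ _
    cases h : (hrpFO cs i).get? (hrpPairAt cs i) with
    | some v =>
      obtain ⟨k, rfl, hki, hkp, hmin⟩ := hrpFO_some cs i _ v h
      by_cases hge : (i : Int) - (k : Int) ≥ 2
      · simp only [if_pos hge]
        constructor
        · intro _; exact ⟨i, k, le_refl i, by omega, by omega, hkp⟩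
        · intro _; trivial
      · simp only [if_neg hge]
        rw [← hrpFO_succ_some cs i (k : Int) h, ih (i + 1)]
        constructor
        · rintro ⟨j, f, hij, hjm, hfj, hpe⟩; exact ⟨j, f, by omega, by omega, hfj, hpe⟩
        · rintro ⟨j, f, hij, hjm, hfj, hpe⟩
          refine ⟨j, f, ?_, by omega, hfj, hpe⟩
          rcases Nat.eq_or_lt_of_le hij with heq | hlt
          · exfalso
            have hfk : f < k := by omega
            rw [← heq] at hpe
            exact hmin f hfk hpe
          · omega
    | none =>
      rw [← hrpFO_succ_none cs i h, ih (i + 1)]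
      constructor
      · rintro ⟨j, f, hij, hjm, hfj, hpe⟩; exact ⟨j, f, by omega, by omega, hfj, hpe⟩
      · rintro ⟨j, f, hij, hjm, hfj, hpe⟩
        refine ⟨j, f, ?_, by omega, hfj, hpe⟩
        rcases Nat.eq_or_lt_of_le hij with heq | hlt
        · exfalso
          rw [← heq] at hpe
          exact (hrpFO_none cs i (hrpPairAt cs i)).mp h f (by omega) hpe
        · omega

-- B returns true iff some adjacent pair repeats at distance ≥ 2
theorem hrpB_iff (s : String) :
    has_repeated_pairs_dcc_alt s = true ↔
      ∃ f j : Nat, f + 2 ≤ j ∧ j + 1 < s.toList.length ∧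
        hrpPairAt s.toList f = hrpPairAt s.toList j := by
  unfold has_repeated_pairs_dcc_alt
  rw [List.range_eq_range', show PySem.Dict.empty = hrpFO s.toList 0 from rfl,
    hrpAltLoop_iff s.toList (s.toList.length - 1) 0]
  constructor
  · rintro ⟨j, f, _, hjm, hfj, hpe⟩; exact ⟨f, j, hfj, by omega, hpe⟩
  · rintro ⟨f, j, hfj, hjl, hpe⟩; exact ⟨j, f, by omega, by omega, hfj, hpe⟩

-- bridges between D_'s take/drop pair comparisons and hrpPairAt
theorem hrpTakeTwo (cs : List Char) (k : Nat) (h : k + 1 < cs.length) :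
    (cs.drop k).take 2 = [cs.getD k ' ', cs.getD (k + 1) ' '] := by
  apply List.ext_getElem
  · simp; omega
  · intro i h1 h2
    simp only [List.length_cons, List.length_nil] at h2
    have hd : k + i < cs.length := by omega
    rw [List.getElem_take, List.getElem_drop]
    interval_cases i
    · rw [List.getElem_cons_zero, List.getD_eq_getElem _ _ (show k < cs.length by omega)]
      simp
    · rw [List.getElem_cons_succ, List.getElem_cons_zero,
        List.getD_eq_getElem _ _ (show k + 1 < cs.length by omega)]

theorem hrpTakeTwo_eq_iff (cs : List Char) (f j : Nat)
    (hf : f + 1 < cs.length) (hj : j + 1 < cs.length) :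
    (cs.drop f).take 2 = (cs.drop j).take 2 ↔ hrpPairAt cs f = hrpPairAt cs j := by
  rw [hrpTakeTwo cs f hf, hrpTakeTwo cs j hj]
  simp [hrpPairAt, Prod.ext_iff]

theorem hrpHead_eq_iff (cs : List Char) (h : 4 ≤ cs.length) :
    cs.take 2 = cs.drop (cs.length - 2) ↔ hrpPairAt cs 0 = hrpPairAt cs (cs.length - 2) := by
  have h2 : cs.drop (cs.length - 2) = (cs.drop (cs.length - 2)).take 2 :=
    (List.take_of_length_le (by simp; omega)).symm
  rw [show cs.take 2 = (cs.drop 0).take 2 by rw [List.drop_zero], h2,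
    hrpTakeTwo_eq_iff cs 0 (cs.length - 2) (by omega) (by omega)]

-- ===== VERDICT (by name: the statement is the Claim_ definition above) =====
theorem has_repeated_pairs_dcc_spec : Claim_unchanged_has_repeated_pairs_dcc := by
  intro s _ hD
  cases hA : has_repeated_pairs_dcc s with
  | true =>
    obtain ⟨f, j, h1, _, h3, h4⟩ := (hrpA_iff s).mp hA
    rw [(hrpB_iff s).mpr ⟨f, j, h1, h3, h4⟩]
  | false =>
    cases hB : has_repeated_pairs_dcc_alt s with
    | false => rfl
    | true =>
      exfalso
      apply hD
      obtain ⟨f, j, hfj, hjl, hpe⟩ := (hrpB_iff s).mp hB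
      have hnA : ¬ ∃ f j : Nat, f + 2 ≤ j ∧ j + 3 ≤ f + s.toList.length ∧
          j + 1 < s.toList.length ∧ hrpPairAt s.toList f = hrpPairAt s.toList j := by
        rw [← hrpA_iff, hA]; simp
      have hgap : ¬ (j + 3 ≤ f + s.toList.length) := fun h => hnA ⟨f, j, hfj, h, hjl, hpe⟩
      have hf0 : f = 0 := by omega
      have hj : j = s.toList.length - 2 := by omega
      refine ⟨by omega, ?_, ?_⟩
      · rw [hrpHead_eq_iff s.toList (by omega), ← hf0, ← hj]; exact hpe
      · intro j' hj' f' hf' hpe'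
        rw [hrpTakeTwo_eq_iff s.toList f' j' (by omega) (by omega)] at hpe'
        by_cases hc : j' + 3 ≤ f' + s.toList.length
        · exact absurd ⟨f', j', by omega, hc, by omega, hpe'⟩ hnA
        · omega

theorem has_repeated_pairs_dcc_changed : Claim_changed_has_repeated_pairs_dcc := by
  unfold Claim_changed_has_repeated_pairs_dcc; decide

theorem has_repeated_pairs_dcc_tight : Claim_exact_has_repeated_pairs_dcc := by
  intro s _ hD
  obtain ⟨h4, hpair02, hall⟩ := hD
  have hA : has_repeated_pairs_dcc s = false := by
    cases hA : has_repeated_pairs_dcc s with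
    | false => rfl
    | true =>
      obtain ⟨f, j, h1, h2, h3, hpe⟩ := (hrpA_iff s).mp hA
      have := hall j (by omega) f (by omega)
        ((hrpTakeTwo_eq_iff s.toList f j (by omega) (by omega)).mpr hpe)
      omega
  have hB : has_repeated_pairs_dcc_alt s = true := by
    refine (hrpB_iff s).mpr ⟨0, s.toList.length - 2, by omega, by omega, ?_⟩
    exact (hrpHead_eq_iff s.toList h4).mp hpair02
  rw [hA, hB]
  simp
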